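-- pv_equiv track=rewrite | github.com/mchoi5041/learn_voca | run.py | tokenization
-- ===== SOURCE A (Python) =====
-- def tokenization(text):
-- 	if len(text) == 0:
-- 		return
-- 	start_pos = 0
-- 	while start_pos < len(text):
-- 		while start_pos < len(text):
-- 			if text[start_pos].isalpha():
-- 				break
-- 			else:
-- 				start_pos += 1
-- 		end_pos = start_pos
-- 		while end_pos < len(text):
-- 			if text[end_pos].isalpha():
-- 				end_pos += 1
-- 			else:
-- 				break
-- 		word = text[start_pos:end_pos].lower()
-- 		if word.find('urgent') == -1:
-- 			yield text[start_pos:end_pos]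
-- 		start_pos = end_pos
-- ===== SOURCE B (Python) =====
-- def tokenization(text):
-- 	# Split-into-fields pass: one scan builds the list of fields (each a list
-- 	# of characters), where each maximal non-alphabetic run closes the current
-- 	# field and opens the next (so a trailing separator run leaves a final
-- 	# empty field, as in A), then fields containing 'urgent'
-- 	# (case-insensitively) are filtered out and joined.
-- 	if len(text) == 0:
-- 		return
-- 	fields = [[]]
-- 	for ch in text:
-- 		if ch.isalpha():
-- 			fields[-1].append(ch)
-- 		elif fields[-1]:
-- 			fields.append([])
-- 	for buf in fields:
-- 		word = ''.join(buf)
-- 		if 'urgent' not in word.lower():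
-- 			yield word
-- ===== Notes on version B (the rewrite author's own statement) =====
-- stated objective: simpler
-- what changed: Replaced A's three nested index-based while loops with slicing by a single split-into-fields scan: one pass appends each alphabetic character to the current field buffer and lets each separator run close it and open the next (a trailing separator run thus leaves a final empty field, exactly as A yields), then fields containing 'urgent' are filtered out.
import Mathlib
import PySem

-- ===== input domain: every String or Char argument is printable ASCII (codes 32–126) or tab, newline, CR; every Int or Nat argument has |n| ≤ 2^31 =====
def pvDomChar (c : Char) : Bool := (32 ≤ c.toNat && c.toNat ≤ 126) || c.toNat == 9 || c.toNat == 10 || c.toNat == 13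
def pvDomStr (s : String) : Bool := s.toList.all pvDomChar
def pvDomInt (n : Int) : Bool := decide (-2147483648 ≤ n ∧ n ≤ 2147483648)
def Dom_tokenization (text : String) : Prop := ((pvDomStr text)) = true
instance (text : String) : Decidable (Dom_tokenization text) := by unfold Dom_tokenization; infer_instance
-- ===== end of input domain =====

-- B replaces A's nested index/while/slice loops by one split-into-fields scan
-- followed by a filter (objective: simpler); same value on every input.

-- ===== PORT A =====
-- inner `while`: advance start_pos past non-alphabetic characters (fuel-counted literal port)
def pvSkip (cs : List Char) : Nat → Nat → Nat
  | 0, i => i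
  | fuel + 1, i =>
    if h : i < cs.length then
      if PySem.Chars.isalpha cs[i] then i else pvSkip cs fuel (i + 1)
    else i

-- inner `while`: advance end_pos over alphabetic characters
def pvTake (cs : List Char) : Nat → Nat → Nat
  | 0, i => i
  | fuel + 1, i =>
    if h : i < cs.length then
      if PySem.Chars.isalpha cs[i] then pvTake cs fuel (i + 1) else i
    else i

-- outer `while start_pos < len(text)` loop of A
def pvLoopA (cs : List Char) : Nat → Nat → List String
  | 0, _ => []
  | fuel + 1, i =>
    if i < cs.length then
      let s := pvSkip cs cs.length i
      let e := pvTake cs cs.length s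
      let seg := PySem.List.slice cs (some (s : Int)) (some (e : Int))   -- text[start_pos:end_pos]
      let word := PySem.Chars.lower seg                                  -- .lower()
      (if PySem.Chars.find word "urgent".toList = -1 then [String.mk seg] else []) ++
        pvLoopA cs fuel e
    else []

def tokenization (text : String) : List String :=
  if text.toList.length = 0 then [] else pvLoopA text.toList (text.toList.length + 1) 0

-- ===== PORT B =====
-- state of Source B's for-loop: (closed fields, current field `fields[-1]`)
def tokenization_alt (text : String) : List String :=
  if text.toList.length = 0 then [] else
    let st := text.toList.foldl
      (fun (st : List (List Char) × List Char) ch =>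
        if PySem.Chars.isalpha ch then (st.1, st.2 ++ [ch])       -- fields[-1].append(ch)
        else if st.2 = [] then st                                  -- elif fields[-1]:
        else (st.1 ++ [st.2], []))                                 --   fields.append('')
      ([], [])
    let fields := st.1 ++ [st.2]
    (fields.filter
      (fun w => !PySem.Chars.isIn "urgent".toList (PySem.Chars.lower w))).map String.mk

-- ===== PRECONDITION & SPEC =====
def Spec_tokenization (text : String) (out : List String) : Prop := out = tokenization_alt text
instance (text : String) (out : List String) : Decidable (Spec_tokenization text out) := by unfold Spec_tokenization; infer_instance

-- ===== CLAIM (what is proved, stated in full; the proofs are below) =====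
def Claim_equal_tokenization : Prop := ∀ (text : String), Dom_tokenization text → Spec_tokenization text (tokenization text)

-- ===== LEMMAS AND PROOFS =====

-- `yield` of one word under A's urgent filter
def pvYield (run : List Char) : List String :=
  if PySem.Chars.isIn "urgent".toList (PySem.Chars.lower run) then [] else [String.mk run]

lemma dropWhile_head_false {α : Type} (p : α → Bool) :
    ∀ (l : List α) {a : α} {r : List α}, l.dropWhile p = a :: r → p a = false := by
  intro l
  induction l with
  | nil => intro a r h; simp at h
  | cons x xs ih =>
    intro a r h
    rw [List.dropWhile_cons] at h
    by_cases hx : p x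
    · exact ih (by simpa [hx] using h)
    · rw [if_neg hx] at h
      cases h
      simpa using hx

lemma pvG_dec (c : Char) (rest : List Char) :
    ((List.dropWhile (fun c => !PySem.Chars.isalpha c) (c :: rest)).dropWhile PySem.Chars.isalpha).length < (c :: rest).length := by
  rcases hd : (c :: rest).dropWhile (fun c => !PySem.Chars.isalpha c) with _ | ⟨a, r⟩
  · simp
  · have haa : PySem.Chars.isalpha a = true := by
      have := dropWhile_head_false _ _ hd
      simpa using this
    have hle : (a :: r).length ≤ (c :: rest).length := by
      rw [← hd]
      exact List.length_dropWhile_le _ _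
    rw [List.dropWhile_cons, if_pos haa]
    have := List.length_dropWhile_le PySem.Chars.isalpha r
    simp only [List.length_cons] at hle ⊢
    omega

-- semantics of one outer iteration of A (skip non-alpha, take the word, maybe yield, recurse)
def pvGsem (l : List Char) : List String :=
  if hl : l = [] then [] else
    let l1 := l.dropWhile (fun c => !PySem.Chars.isalpha c)
    pvYield (l1.takeWhile PySem.Chars.isalpha) ++ pvGsem (l1.dropWhile PySem.Chars.isalpha)
termination_by l.length
decreasing_by
  rcases l with _ | ⟨c, rest⟩
  · exact absurd rfl hl
  · exact pvG_dec c rest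

lemma pvGsem_eq (m : List Char) :
    pvGsem m = if m = [] then [] else
      pvYield ((m.dropWhile (fun c => !PySem.Chars.isalpha c)).takeWhile PySem.Chars.isalpha) ++
        pvGsem ((m.dropWhile (fun c => !PySem.Chars.isalpha c)).dropWhile PySem.Chars.isalpha) := by
  by_cases h : m = []
  · simp [h, pvGsem]
  · rw [pvGsem, dif_neg h, if_neg h]

lemma pvYield_eq_find (w : List Char) :
    (if PySem.Chars.find (PySem.Chars.lower w) "urgent".toList = -1 then [String.mk w] else []) = pvYield w := by
  unfold pvYield
  by_cases h : "urgent".toList <:+: PySem.Chars.lower w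
  · have h1 : PySem.Chars.isIn "urgent".toList (PySem.Chars.lower w) = true :=
      (PySem.Chars.isIn_iff_infix _ _).mpr h
    have h2 : ¬ PySem.Chars.find (PySem.Chars.lower w) "urgent".toList = -1 := by
      rw [PySem.Chars.find_eq_neg_one_iff]; exact fun h' => h' h
    rw [if_neg h2, if_pos h1]
  · have h1 : PySem.Chars.isIn "urgent".toList (PySem.Chars.lower w) = false :=
      (PySem.Chars.isIn_eq_false_iff _ _).mpr h
    have h2 : PySem.Chars.find (PySem.Chars.lower w) "urgent".toList = -1 :=
      (PySem.Chars.find_eq_neg_one_iff _ _).mpr h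
    rw [if_pos h2, if_neg (by rw [h1]; exact Bool.false_ne_true)]

lemma drop_takeWhile_len (l : List Char) (p : Char → Bool) :
    l.drop (l.takeWhile p).length = l.dropWhile p := by
  induction l with
  | nil => rfl
  | cons c rest ih =>
    by_cases h : p c
    · simp [List.takeWhile_cons, List.dropWhile_cons, h, ih]
    · simp [List.takeWhile_cons, List.dropWhile_cons, h]

lemma take_takeWhile_len (l : List Char) (p : Char → Bool) :
    l.take (l.takeWhile p).length = l.takeWhile p := by
  induction l with
  | nil => rfl
  | cons c rest ih =>
    by_cases h : p c
    · simp [List.takeWhile_cons, h, ih]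
    · simp [List.takeWhile_cons, h]

lemma pvSkip_eq (cs : List Char) (fuel i : Nat) (hf : cs.length - i ≤ fuel) :
    pvSkip cs fuel i = i + ((cs.drop i).takeWhile (fun c => !PySem.Chars.isalpha c)).length := by
  induction fuel generalizing i with
  | zero =>
    have : cs.length ≤ i := by omega
    simp [pvSkip, List.drop_eq_nil_of_le this]
  | succ fuel ih =>
    by_cases h : i < cs.length
    · have hcons : cs.drop i = cs[i] :: cs.drop (i + 1) := List.drop_eq_getElem_cons h
      by_cases ha : PySem.Chars.isalpha cs[i]
      · rw [hcons]
        simp [pvSkip, h, ha]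
      · rw [pvSkip, dif_pos h, if_neg ha, ih (i + 1) (by omega), hcons,
            List.takeWhile_cons, if_pos (by simp [ha]), List.length_cons]
        omega
    · simp [pvSkip, h, List.drop_eq_nil_of_le (by omega : cs.length ≤ i)]

lemma pvTake_eq (cs : List Char) (fuel i : Nat) (hf : cs.length - i ≤ fuel) :
    pvTake cs fuel i = i + ((cs.drop i).takeWhile PySem.Chars.isalpha).length := by
  induction fuel generalizing i with
  | zero =>
    have : cs.length ≤ i := by omega
    simp [pvTake, List.drop_eq_nil_of_le this]
  | succ fuel ih =>
    by_cases h : i < cs.length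
    · have hcons : cs.drop i = cs[i] :: cs.drop (i + 1) := List.drop_eq_getElem_cons h
      by_cases ha : PySem.Chars.isalpha cs[i]
      · rw [pvTake, dif_pos h, if_pos ha, ih (i + 1) (by omega), hcons,
            List.takeWhile_cons, if_pos ha, List.length_cons]
        omega
      · rw [hcons]
        simp [pvTake, h, ha]
    · simp [pvTake, h, List.drop_eq_nil_of_le (by omega : cs.length ≤ i)]

-- after skipping/taking exactly the takeWhile-length, the remaining suffix is the dropWhile
lemma drop_add_takeWhile (cs : List Char) (i : Nat) (p : Char → Bool) :
    cs.drop (i + ((cs.drop i).takeWhile p).length) = (cs.drop i).dropWhile p := by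
  rw [← List.drop_drop, drop_takeWhile_len]

lemma pvLoopA_eq_G (cs : List Char) (fuel : Nat) : ∀ (i : Nat), cs.length - i < fuel →
    pvLoopA cs fuel i = pvGsem (cs.drop i) := by
  induction fuel with
  | zero => intro i h; omega
  | succ fuel ih =>
    intro i hf
    by_cases h : i < cs.length
    · have hlne : cs.drop i ≠ [] := by
        simp only [ne_eq, List.drop_eq_nil_iff]
        omega
      have hs : pvSkip cs cs.length i
          = i + ((cs.drop i).takeWhile (fun c => !PySem.Chars.isalpha c)).length :=
        pvSkip_eq cs cs.length i (by omega)
      have ha_le : ((cs.drop i).takeWhile (fun c => !PySem.Chars.isalpha c)).length ≤ cs.length - i := by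
        have := (List.takeWhile_sublist (l := cs.drop i) (fun c => !PySem.Chars.isalpha c)).length_le
        simpa using this
      have hdrops : cs.drop (pvSkip cs cs.length i)
          = (cs.drop i).dropWhile (fun c => !PySem.Chars.isalpha c) := by
        rw [hs, drop_add_takeWhile]
      have ht : pvTake cs cs.length (pvSkip cs cs.length i)
          = pvSkip cs cs.length i
            + ((cs.drop (pvSkip cs cs.length i)).takeWhile PySem.Chars.isalpha).length :=
        pvTake_eq cs cs.length _ (by omega)
      have hb_le : ((cs.drop (pvSkip cs cs.length i)).takeWhile PySem.Chars.isalpha).length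
          ≤ cs.length - pvSkip cs cs.length i := by
        have := (List.takeWhile_sublist (l := cs.drop (pvSkip cs cs.length i)) PySem.Chars.isalpha).length_le
        simpa using this
      have hseg : PySem.List.slice cs (some ((pvSkip cs cs.length i) : Int))
            (some ((pvTake cs cs.length (pvSkip cs cs.length i)) : Int))
          = ((cs.drop i).dropWhile (fun c => !PySem.Chars.isalpha c)).takeWhile PySem.Chars.isalpha := by
        rw [PySem.List.slice_natCast, ht, Nat.add_sub_cancel_left, ← hdrops, take_takeWhile_len, hdrops]
      have hdrope : cs.drop (pvTake cs cs.length (pvSkip cs cs.length i))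
          = ((cs.drop i).dropWhile (fun c => !PySem.Chars.isalpha c)).dropWhile PySem.Chars.isalpha := by
        rw [ht, drop_add_takeWhile, hdrops]
      have hei : i < pvTake cs cs.length (pvSkip cs cs.length i) := by
        rcases Nat.eq_zero_or_pos ((cs.drop i).takeWhile (fun c => !PySem.Chars.isalpha c)).length
          with h0 | h0
        · -- start_pos already at a letter: the word loop advances at least one step
          have hcons : cs.drop i = cs[i] :: cs.drop (i + 1) := List.drop_eq_getElem_cons h
          have hha : PySem.Chars.isalpha cs[i] = true := by
            by_contra hna
            rw [hcons, List.takeWhile_cons, if_pos (by simp [hna])] at h0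
            simp at h0
          have hb1 : 0 < ((cs.drop (pvSkip cs cs.length i)).takeWhile PySem.Chars.isalpha).length := by
            rw [hs, h0, Nat.add_zero, hcons, List.takeWhile_cons, if_pos hha]
            simp
          omega
        · omega
      rw [pvLoopA]
      simp only [if_pos h]
      rw [hseg, ih _ (by omega), hdrope]
      conv_rhs => rw [pvGsem_eq]
      rw [if_neg hlne, pvYield_eq_find]
    · have hnil : cs.drop i = [] := List.drop_eq_nil_of_le (by omega)
      rw [pvLoopA, if_neg h, hnil, pvGsem]
      simp

lemma takeWhile_append_stop {p : Char → Bool} :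
    ∀ (xs : List Char) (c : Char) (l : List Char), (∀ x ∈ xs, p x) → p c = false →
      (xs ++ c :: l).takeWhile p = xs := by
  intro xs
  induction xs with
  | nil => intro c l _ hc; simp [hc]
  | cons x ys ih =>
    intro c l hall hc
    rw [List.cons_append, List.takeWhile_cons, if_pos (hall x (by simp))]
    rw [ih c l (fun d hd => hall d (by simp [hd])) hc]

lemma dropWhile_append_stop {p : Char → Bool} :
    ∀ (xs : List Char) (c : Char) (l : List Char), (∀ x ∈ xs, p x) → p c = false →
      (xs ++ c :: l).dropWhile p = c :: l := by
  intro xs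
  induction xs with
  | nil => intro c l _ hc; simp [hc]
  | cons x ys ih =>
    intro c l hall hc
    rw [List.cons_append, List.dropWhile_cons, if_pos (hall x (by simp))]
    exact ih c l (fun d hd => hall d (by simp [hd])) hc

-- B's semantics on the rest of the text, given the current partial field `last`
def pvB2out (last : List Char) : List Char → List String
  | [] => pvYield last
  | ch :: rest =>
    if PySem.Chars.isalpha ch then pvB2out (last ++ [ch]) rest
    else if last = [] then pvB2out [] rest
    else pvYield last ++ pvB2out [] rest

-- skipping one separator in A's semantics
lemma pvGsem_cons_nonalpha (ch : Char) (rest : List Char) (hc : ¬ PySem.Chars.isalpha ch) :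
    pvGsem (ch :: rest) = (if rest = [] then pvYield [] else pvGsem rest) := by
  rcases eq_or_ne rest [] with hr | hr
  · rw [hr, pvGsem_eq, if_neg (by simp)]
    simp only [List.dropWhile_cons]
    rw [if_pos (by simp [hc])]
    simp [pvGsem]
  · rw [pvGsem_eq (ch :: rest), if_neg (by simp), pvGsem_eq rest, if_neg hr,
        List.dropWhile_cons, if_pos (by simp [hc]), if_neg hr]

lemma pvB2out_eq_G (l : List Char) : ∀ (last : List Char), (∀ c ∈ last, PySem.Chars.isalpha c) →
    last ++ l ≠ [] → pvB2out last l = pvGsem (last ++ l) := by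
  induction l with
  | nil =>
    intro last hall hne
    simp only [List.append_nil] at hne ⊢
    have h1 : last.dropWhile (fun c => !PySem.Chars.isalpha c) = last := by
      apply List.dropWhile_eq_self_iff.mpr
      intro hl
      simp [hall _ (List.getElem_mem hl)]
    rw [pvB2out, pvGsem_eq, if_neg hne, h1,
        List.takeWhile_eq_self_iff.mpr hall, List.dropWhile_eq_nil_iff.mpr hall]
    simp [pvGsem]
  | cons ch rest ih =>
    intro last hall hne
    by_cases hc : PySem.Chars.isalpha ch
    · rw [pvB2out, if_pos hc, ih (last ++ [ch])
        (by intro d hd; rcases List.mem_append.mp hd with h | h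
            · exact hall d h
            · simp at h; subst h; exact hc)
        (by simp)]
      simp
    · have hskip : (if rest = [] then pvYield [] else pvGsem rest) = pvB2out [] rest := by
        rcases eq_or_ne rest [] with hr | hr
        · rw [hr, pvB2out, if_pos rfl]
        · rw [if_neg hr]
          have h2 := ih [] (by simp) (by simpa using hr)
          simp only [List.nil_append] at h2
          exact h2.symm
      rcases eq_or_ne last [] with hl | hl
      · rw [hl, pvB2out, if_neg hc, if_pos rfl]
        simp only [List.nil_append]
        rw [pvGsem_cons_nonalpha ch rest hc, hskip]
      · rw [pvB2out, if_neg hc, if_neg hl]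
        have hrw : last ++ ch :: rest
            = (last ++ ch :: rest).dropWhile (fun c => !PySem.Chars.isalpha c) := by
          symm
          apply List.dropWhile_eq_self_iff.mpr
          intro hgl
          rcases List.exists_cons_of_ne_nil hl with ⟨a, r, ha⟩
          have : (last ++ ch :: rest)[0] = a := by simp [ha]
          rw [this]
          simp [hall a (by simp [ha])]
        rw [pvGsem_eq, if_neg (by simp [hl]), ← hrw,
            takeWhile_append_stop last ch rest hall (by simpa using hc),
            dropWhile_append_stop last ch rest hall (by simpa using hc),
            pvGsem_cons_nonalpha ch rest hc, hskip]

lemma pvFilter_single (last : List Char) :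
    (([last].filter (fun w => !PySem.Chars.isIn "urgent".toList (PySem.Chars.lower w))).map String.mk)
      = pvYield last := by
  unfold pvYield
  rw [show ("urgent".toList) = ['u','r','g','e','n','t'] from rfl]
  cases h : PySem.Chars.isIn ['u','r','g','e','n','t'] (PySem.Chars.lower last) <;>
    simp [List.filter, h]

-- invariant of Source B's fold (state = closed fields + current field)
lemma pvFoldB_inv (l : List Char) : ∀ (done : List (List Char)) (last : List Char),
    (((((l.foldl
        (fun (st : List (List Char) × List Char) ch =>
          if PySem.Chars.isalpha ch then (st.1, st.2 ++ [ch])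
          else if st.2 = [] then st
          else (st.1 ++ [st.2], []))
        (done, last)).1 ++ [(l.foldl
        (fun (st : List (List Char) × List Char) ch =>
          if PySem.Chars.isalpha ch then (st.1, st.2 ++ [ch])
          else if st.2 = [] then st
          else (st.1 ++ [st.2], []))
        (done, last)).2]).filter
        (fun w => !PySem.Chars.isIn "urgent".toList (PySem.Chars.lower w))).map String.mk))
    = ((done.filter (fun w => !PySem.Chars.isIn "urgent".toList (PySem.Chars.lower w))).map String.mk)
      ++ pvB2out last l := by
  induction l with
  | nil =>
    intro done last
    rw [pvB2out]
    simp only [List.foldl_nil, List.filter_append, List.map_append]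
    rw [pvFilter_single last]
  | cons ch rest ih =>
    intro done last
    by_cases hc : PySem.Chars.isalpha ch
    · simp only [List.foldl_cons, if_pos hc]
      rw [ih done (last ++ [ch]), pvB2out, if_pos hc]
    · rcases eq_or_ne last [] with hl | hl
      · simp only [List.foldl_cons, if_neg hc, hl, eq_self_iff_true, if_true]
        rw [ih done [], pvB2out, if_neg hc, if_pos rfl]
      · simp only [List.foldl_cons, if_neg hc, if_neg hl]
        rw [ih (done ++ [last]) [], pvB2out, if_neg hc, if_neg hl]
        simp only [List.filter_append, List.map_append, List.append_assoc]
        rw [pvFilter_single last]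

lemma tokenization_alt_eq_G (text : String) (hne : text.toList ≠ []) :
    tokenization_alt text = pvGsem text.toList := by
  unfold tokenization_alt
  rw [if_neg (fun hz => hne (List.eq_nil_of_length_eq_zero hz))]
  have h := pvFoldB_inv text.toList [] []
  simp only [List.filter_nil, List.map_nil, List.nil_append] at h
  rw [h, pvB2out_eq_G text.toList [] (by simp) (by simpa using hne)]
  simp

lemma tokenization_eq_G (text : String) : tokenization text = pvGsem text.toList := by
  unfold tokenization
  rcases eq_or_ne text.toList [] with h | h
  · simp [h, pvGsem]
  · rw [if_neg (fun hz => h (List.eq_nil_of_length_eq_zero hz)),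
        pvLoopA_eq_G text.toList (text.toList.length + 1) 0 (by omega)]
    simp

-- ===== VERDICT (by name: the statement is the Claim_ definition above) =====
theorem tokenization_spec : Claim_equal_tokenization := by
  intro text _
  unfold Spec_tokenization
  rcases eq_or_ne text.toList [] with h | h
  · unfold tokenization tokenization_alt
    simp [h]
  · rw [tokenization_eq_G, tokenization_alt_eq_G text h]
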